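-- pv_equiv track=rewrite | github.com/kahwei-loo/doctify | backend/app/utils/sanitizer.py | escape_for_json
-- ===== SOURCE A (Python) =====
-- def escape_for_json(value: str) -> str:
--     """
--     Escape a string for safe JSON embedding.
--
--     Args:
--         value: The string to escape
--
--     Returns:
--         JSON-safe string
--     """
--     # Replace control characters and potentially dangerous characters
--     replacements = {
--         "\\": "\\\\",
--         '"': '\\"',
--         "\n": "\\n",
--         "\r": "\\r",
--         "\t": "\\t",
--         "\b": "\\b",
--         "\f": "\\f",
--     }
--
--     for char, escape in replacements.items():
--         value = value.replace(char, escape)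
--
--     return value
-- ===== SOURCE B (Python) =====
-- def escape_for_json(value: str) -> str:
--     """
--     Escape a string for safe JSON embedding.
--
--     Args:
--         value: The string to escape
--
--     Returns:
--         JSON-safe string
--     """
--     replacements = {
--         "\\": "\\\\",
--         '"': '\\"',
--         "\n": "\\n",
--         "\r": "\\r",
--         "\t": "\\t",
--         "\b": "\\b",
--         "\f": "\\f",
--     }
--     # One pass: map each original character independently through the table.
--     return ''.join(replacements.get(c, c) for c in value)
-- ===== Notes on version B (the rewrite author's own statement) =====
-- stated objective: idiomatic
-- what changed: Replaces seven sequential full-string str.replace passes by a single character-by-character pass that maps each original character through the replacements table and joins the result.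
import Mathlib
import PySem

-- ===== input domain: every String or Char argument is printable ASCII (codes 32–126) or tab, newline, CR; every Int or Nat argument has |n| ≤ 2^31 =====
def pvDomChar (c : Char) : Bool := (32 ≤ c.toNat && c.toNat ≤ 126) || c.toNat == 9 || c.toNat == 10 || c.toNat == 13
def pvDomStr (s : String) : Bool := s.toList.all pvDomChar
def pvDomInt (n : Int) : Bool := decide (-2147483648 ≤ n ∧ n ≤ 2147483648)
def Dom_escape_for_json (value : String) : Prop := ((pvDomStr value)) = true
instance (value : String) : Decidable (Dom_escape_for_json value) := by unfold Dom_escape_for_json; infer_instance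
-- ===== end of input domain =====

-- B replaces A's seven sequential str.replace passes by one character-level pass
-- through the same replacements table (objective: idiomatic single scan).


-- ===== PORT A =====
-- the replacements dict, in Python insertion order
def pvReplA : PySem.Dict String String :=
  ((((((PySem.Dict.empty.insert "\\" "\\\\").insert "\"" "\\\"").insert "\n" "\\n").insert
      "\r" "\\r").insert "\t" "\\t").insert "\x08" "\\b").insert "\x0c" "\\f"

def escape_for_json (value : String) : String :=
  -- for char, escape in replacements.items(): value = value.replace(char, escape)
  pvReplA.items.foldl (fun v p => PySem.Str.replace v p.1 p.2) value

-- ===== PORT B =====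
-- same dict; values kept as List Char (the PySem content of a Python string)
def pvReplB : PySem.Dict Char (List Char) :=
  ((((((PySem.Dict.empty.insert '\\' ['\\', '\\']).insert '"' ['\\', '"']).insert
      '\n' ['\\', 'n']).insert '\r' ['\\', 'r']).insert '\t' ['\\', 't']).insert
      '\x08' ['\\', 'b']).insert '\x0c' ['\\', 'f']

def escape_for_json_alt (value : String) : String :=
  -- ''.join(replacements.get(c, c) for c in value): the join of the per-character
  -- strings is, at the Chars level, exactly the flatMap of their char lists
  String.ofList (value.toList.flatMap (fun c => pvReplB.getD c [c]))

-- ===== PRECONDITION & SPEC =====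
def Spec_escape_for_json (value : String) (out : String) : Prop := out = escape_for_json_alt value
instance (value : String) (out : String) : Decidable (Spec_escape_for_json value out) := by unfold Spec_escape_for_json; infer_instance

-- ===== CLAIM (what is proved, stated in full; the proofs are below) =====
def Claim_equal_escape_for_json : Prop := ∀ (value : String), Dom_escape_for_json value → Spec_escape_for_json value (escape_for_json value)

-- ===== LEMMAS AND PROOFS =====

-- a single-character pattern replace is a per-character flatMap
theorem pv_go_single (o : Char) (new : List Char) :
    ∀ (fuel : Nat) (l acc : List Char), l.length ≤ fuel →
      PySem.Chars.replace.go [o] new fuel l acc =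
        acc.reverse ++ l.flatMap (fun c => if c = o then new else [c]) := by
  intro fuel
  induction fuel with
  | zero =>
    intro l acc h
    have : l = [] := List.eq_nil_of_length_eq_zero (Nat.le_zero.mp h)
    subst this
    simp [PySem.Chars.replace.go]
  | succ n ih =>
    intro l acc h
    cases l with
    | nil => simp [PySem.Chars.replace.go]
    | cons c t =>
      by_cases hc : c = o
      · subst hc
        simp only [PySem.Chars.replace.go, List.isPrefixOf, BEq.rfl, Bool.true_and,
          List.isPrefixOf_nil_left, if_true]
        simp only [List.length_cons, List.length_nil, List.drop_succ_cons, List.drop_zero]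
        rw [ih t (new.reverse ++ acc) (by simpa using Nat.le_of_succ_le_succ h)]
        simp
      · simp only [PySem.Chars.replace.go, List.isPrefixOf, List.isPrefixOf_nil_left,
          Bool.and_true]
        rw [if_neg (by simp [beq_iff_eq]; exact fun hh => hc hh.symm)]
        rw [ih t (c :: acc) (Nat.le_of_succ_le_succ h)]
        simp [hc]

theorem pv_replace_single (s : List Char) (o : Char) (new : List Char) :
    PySem.Chars.replace s [o] new = s.flatMap (fun c => if c = o then new else [c]) := by
  rw [PySem.Chars.replace]
  simp only [List.isEmpty_cons, if_false]
  simpa using pv_go_single o new s.length s [] le_rfl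

-- ===== VERDICT (by name: the statement is the Claim_ definition above) =====
theorem escape_for_json_spec : Claim_equal_escape_for_json := by
  intro value _
  unfold Spec_escape_for_json
  apply String.toList_inj.mp
  have hA : escape_for_json value =
      PySem.Str.replace (PySem.Str.replace (PySem.Str.replace (PySem.Str.replace
        (PySem.Str.replace (PySem.Str.replace (PySem.Str.replace value "\\" "\\\\")
        "\"" "\\\"") "\n" "\\n") "\r" "\\r") "\t" "\\t") "\x08" "\\b") "\x0c" "\\f" := rfl
  rw [hA]
  simp only [PySem.Str.toList_replace]
  have ht1 : ("\\" : String).toList = ['\\'] := rfl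
  have ht2 : ("\"" : String).toList = ['"'] := rfl
  have ht3 : ("\n" : String).toList = ['\n'] := rfl
  have ht4 : ("\r" : String).toList = ['\r'] := rfl
  have ht5 : ("\t" : String).toList = ['\t'] := rfl
  have ht6 : ("\x08" : String).toList = ['\x08'] := rfl
  have ht7 : ("\x0c" : String).toList = ['\x0c'] := rfl
  have hr1 : ("\\\\" : String).toList = ['\\','\\'] := rfl
  have hr2 : ("\\\"" : String).toList = ['\\','"'] := rfl
  have hr3 : ("\\n" : String).toList = ['\\','n'] := rfl
  have hr4 : ("\\r" : String).toList = ['\\','r'] := rfl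
  have hr5 : ("\\t" : String).toList = ['\\','t'] := rfl
  have hr6 : ("\\b" : String).toList = ['\\','b'] := rfl
  have hr7 : ("\\f" : String).toList = ['\\','f'] := rfl
  rw [ht1, ht2, ht3, ht4, ht5, ht6, ht7, hr1, hr2, hr3, hr4, hr5, hr6, hr7]
  simp only [pv_replace_single, List.flatMap_assoc]
  show _ = (escape_for_json_alt value).toList
  unfold escape_for_json_alt
  rw [String.toList_ofList]
  refine List.flatMap_congr (fun c _ => ?_)
  by_cases h1 : c = '\\'; · subst h1; decide
  by_cases h2 : c = '"'; · subst h2; decide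
  by_cases h3 : c = '\n'; · subst h3; decide
  by_cases h4 : c = '\r'; · subst h4; decide
  by_cases h5 : c = '\t'; · subst h5; decide
  by_cases h6 : c = '\x08'; · subst h6; decide
  by_cases h7 : c = '\x0c'; · subst h7; decide
  have b1 : ('\\' == c) = false := beq_eq_false_iff_ne.mpr (Ne.symm h1)
  have b2 : ('"' == c) = false := beq_eq_false_iff_ne.mpr (Ne.symm h2)
  have b3 : ('\n' == c) = false := beq_eq_false_iff_ne.mpr (Ne.symm h3)
  have b4 : ('\r' == c) = false := beq_eq_false_iff_ne.mpr (Ne.symm h4)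
  have b5 : ('\t' == c) = false := beq_eq_false_iff_ne.mpr (Ne.symm h5)
  have b6 : ('\x08' == c) = false := beq_eq_false_iff_ne.mpr (Ne.symm h6)
  have b7 : ('\x0c' == c) = false := beq_eq_false_iff_ne.mpr (Ne.symm h7)
  simp [pvReplB, PySem.Dict.getD, PySem.Dict.get?, PySem.Dict.insert, PySem.Dict.empty,
    List.find?, h1, h2, h3, h4, h5, h6, h7, b1, b2, b3, b4, b5, b6, b7]
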